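-- pv_equiv track=rewrite | github.com/ChenxiJ/Tower-of-Hanoi | hanoi.py | space
-- ===== SOURCE A (Python) =====
-- def space(towers, level):
--     space = [0] * 3
--     for i in range(3):
--         if level > len(towers[i]):
--             if i == 0:
--                 continue
--             elif i ==1:
--                 space[i] = space[i - 1]
--             else:
--                 if level > len(towers[i - 1]):
--                     continue
--                 else:
--                     space[i] = towers[i - 1][level - 1] // 2
--         else:
--             if i == 0:
--                 space[i] = towers[i][level - 1] // 2
--             elif i ==1:
--                 space[i] = space[i - 1] + towers[i][level - 1] // 2
--             else:
--                 if level > len(towers[i - 1]):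
--                     space[i] = towers[i][level - 1] // 2
--                 else:
--                     space[i] = towers[i - 1][level - 1] // 2 + towers[i][level - 1] // 2
--     return space
-- ===== SOURCE B (Python) =====
-- def space(towers, level):
--     def go(ts, prev):
--         if not ts:
--             return []
--         t = ts[0]
--         cur = t[level - 1] // 2 if level <= len(t) else 0
--         return [prev + cur] + go(ts[1:], cur)
--     return go(towers[:3], 0)
-- ===== Notes on version B (the rewrite author's own statement) =====
-- stated objective: simpler
-- what changed: Replaces A's indexed loop over a mutable length-3 list with cascaded per-index conditionals by a recursive traversal of towers[:3] that carries the previous tower's half-width as an accumulator and emits prev+cur at each step.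
import Mathlib
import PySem

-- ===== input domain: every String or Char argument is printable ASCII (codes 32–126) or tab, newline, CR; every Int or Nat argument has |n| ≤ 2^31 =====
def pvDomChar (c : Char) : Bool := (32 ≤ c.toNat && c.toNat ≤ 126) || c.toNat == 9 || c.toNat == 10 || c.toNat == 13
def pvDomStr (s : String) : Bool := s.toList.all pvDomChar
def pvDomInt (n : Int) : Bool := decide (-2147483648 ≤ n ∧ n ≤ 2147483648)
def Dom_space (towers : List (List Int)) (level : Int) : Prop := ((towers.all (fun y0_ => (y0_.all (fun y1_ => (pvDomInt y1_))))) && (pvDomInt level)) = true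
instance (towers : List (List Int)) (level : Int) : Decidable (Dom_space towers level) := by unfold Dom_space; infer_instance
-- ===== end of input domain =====

-- B replaces A's indexed loop with a mutable list and cascaded per-index conditionals by a
-- recursive traversal of towers[:3] carrying the previous half-width (objective: simpler).
-- Return values only; neither mutates its input.

-- ===== PORT A =====
-- transliteration of A's loop body; sp is the mutable list 'space', i the loop index
def spaceStep (towers : List (List Int)) (level : Int) (sp : List Int) (i : Int) : List Int :=
  let ti := (PySem.List.pyGet? towers i).getD []
  if level > (ti.length : Int) then
    if i == 0 then sp
    else if i == 1 then sp.set i.toNat (sp.getD (i - 1).toNat 0)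
    else
      let tp := (PySem.List.pyGet? towers (i - 1)).getD []
      if level > (tp.length : Int) then sp
      else sp.set i.toNat (PySem.Int.floordiv ((PySem.List.pyGet? tp (level - 1)).getD 0) 2)
  else
    if i == 0 then sp.set i.toNat (PySem.Int.floordiv ((PySem.List.pyGet? ti (level - 1)).getD 0) 2)
    else if i == 1 then
      sp.set i.toNat (sp.getD (i - 1).toNat 0 + PySem.Int.floordiv ((PySem.List.pyGet? ti (level - 1)).getD 0) 2)
    else
      let tp := (PySem.List.pyGet? towers (i - 1)).getD []
      if level > (tp.length : Int) then
        sp.set i.toNat (PySem.Int.floordiv ((PySem.List.pyGet? ti (level - 1)).getD 0) 2)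
      else
        sp.set i.toNat (PySem.Int.floordiv ((PySem.List.pyGet? tp (level - 1)).getD 0) 2
                        + PySem.Int.floordiv ((PySem.List.pyGet? ti (level - 1)).getD 0) 2)

def space (towers : List (List Int)) (level : Int) : List Int :=
  (PySem.List.pyRange 0 3 1).foldl (spaceStep towers level) [0, 0, 0]

-- ===== PORT B =====
-- the recursive helper 'go': consumes the remaining towers, carries the previous half-width
def spaceGo (level : Int) : List (List Int) → Int → List Int
  | [], _ => []
  | t :: ts, prev =>
    let cur := if level ≤ (t.length : Int)
               then PySem.Int.floordiv ((PySem.List.pyGet? t (level - 1)).getD 0) 2 else 0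
    (prev + cur) :: spaceGo level ts cur

def space_alt (towers : List (List Int)) (level : Int) : List Int :=
  spaceGo level (PySem.List.slice towers none (some 3)) 0

-- ===== PRECONDITION & SPEC =====
-- Pre_ excludes exactly the inputs where Python A raises: fewer than 3 towers (IndexError on
-- towers[i]) or a checked tower where the negative index level-1 is below -len (IndexError).
def Pre_space (towers : List (List Int)) (level : Int) : Prop :=
  3 ≤ towers.length ∧ ∀ t ∈ towers.take 3, level ≤ (t.length : Int) → 1 - (t.length : Int) ≤ level
instance (towers : List (List Int)) (level : Int) : Decidable (Pre_space towers level) := by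
  unfold Pre_space; infer_instance
def pvWitness_space : List (List Int) × Int := ([[3, 5], [1], []], 2)

def Spec_space (towers : List (List Int)) (level : Int) (out : List Int) : Prop := out = space_alt towers level
instance (towers : List (List Int)) (level : Int) (out : List Int) : Decidable (Spec_space towers level out) := by unfold Spec_space; infer_instance

-- ===== CLAIM (what is proved, stated in full; the proofs are below) =====
def Claim_equal_space : Prop := ∀ (towers : List (List Int)) (level : Int), Dom_space towers level → Pre_space towers level → Spec_space towers level (space towers level)

-- ===== LEMMAS AND PROOFS =====

-- ===== VERDICT (by name: the statement is the Claim_ definition above) =====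
theorem space_spec : Claim_equal_space := by
  intro towers level _ hpre
  obtain ⟨hlen, _⟩ := hpre
  rcases towers with _ | ⟨a, _ | ⟨b, _ | ⟨c, rest⟩⟩⟩
  · simp at hlen
  · simp at hlen
  · simp at hlen
  · unfold Spec_space space space_alt
    have hr : PySem.List.pyRange 0 3 1 = [0, 1, 2] := by decide
    have hs : PySem.List.slice (a :: b :: c :: rest) none (some 3) = [a, b, c] := by
      have := PySem.List.slice_to_natCast (a :: b :: c :: rest) 3
      simpa using this
    have g0 : PySem.List.pyGet? (a :: b :: c :: rest) 0 = some a := by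
      simp [PySem.List.pyGet?, PySem.List.pyIdx?]
      rw [if_pos (by omega)]
      simp
    have g1 : PySem.List.pyGet? (a :: b :: c :: rest) 1 = some b := by
      simp [PySem.List.pyGet?, PySem.List.pyIdx?]
      rw [if_pos (by omega)]
      simp
    have g2 : PySem.List.pyGet? (a :: b :: c :: rest) 2 = some c := by
      simp [PySem.List.pyGet?, PySem.List.pyIdx?]
      rw [if_pos (by omega)]
      simp
    rw [hr, hs]
    by_cases hA : level > (a.length : Int) <;>
    by_cases hB : level > (b.length : Int) <;>
    by_cases hC : level > (c.length : Int) <;>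
      simp [List.foldl, spaceStep, spaceGo, g0, g1, g2, hA, hB, hC, not_lt.2, le_of_not_gt] <;>
      omega
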